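-- pv_equiv track=rewrite | github.com/noivan0/universal-agent-team | config/constants.py | get_complexity_category
-- ===== SOURCE A (Python) =====
-- COMPLEXITY_MAX_SCORE: int = 100
--
-- COMPLEXITY_MIN_SCORE: int = 1
--
-- COMPLEXITY_SCORE_THRESHOLDS: dict[str, tuple[int, int]] = {
--     "low": (1, 30),
--     "medium": (31, 60),
--     "high": (61, 100),
-- }
--
-- def get_complexity_category(score: int) -> str:
--     """Get complexity category name from score.
--
--     Args:
--         score: Complexity score (1-100)
--
--     Returns:
--         Category name: 'low', 'medium', or 'high'
--
--     Raises:
--         ValueError: If score is outside valid range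
--     """
--     if not COMPLEXITY_MIN_SCORE <= score <= COMPLEXITY_MAX_SCORE:
--         raise ValueError(
--             f"Complexity score must be between "
--             f"{COMPLEXITY_MIN_SCORE} and {COMPLEXITY_MAX_SCORE}, "
--             f"got {score}"
--         )
--
--     for category, (min_score, max_score) in COMPLEXITY_SCORE_THRESHOLDS.items():
--         if min_score <= score <= max_score:
--             return category
--
--     # Fallback (shouldn't reach here with proper bounds)
--     return "high"
-- ===== SOURCE B (Python) =====
-- COMPLEXITY_MAX_SCORE: int = 100
-- COMPLEXITY_MIN_SCORE: int = 1
--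
-- def get_complexity_category(score: int) -> str:
--     if not COMPLEXITY_MIN_SCORE <= score <= COMPLEXITY_MAX_SCORE:
--         raise ValueError(
--             f"Complexity score must be between "
--             f"{COMPLEXITY_MIN_SCORE} and {COMPLEXITY_MAX_SCORE}, "
--             f"got {score}"
--         )
--     if score <= 30:
--         return "low"
--     if score <= 60:
--         return "medium"
--     return "high"
-- ===== Notes on version B (the rewrite author's own statement) =====
-- stated objective: idiomatic
-- what changed: Replaced the module-level threshold dict and the for-loop scanning its ranges with a direct conditional chain on the inlined boundaries (<=30 low, <=60 medium, else high); the identical bounds check and ValueError are kept.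
import Mathlib
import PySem

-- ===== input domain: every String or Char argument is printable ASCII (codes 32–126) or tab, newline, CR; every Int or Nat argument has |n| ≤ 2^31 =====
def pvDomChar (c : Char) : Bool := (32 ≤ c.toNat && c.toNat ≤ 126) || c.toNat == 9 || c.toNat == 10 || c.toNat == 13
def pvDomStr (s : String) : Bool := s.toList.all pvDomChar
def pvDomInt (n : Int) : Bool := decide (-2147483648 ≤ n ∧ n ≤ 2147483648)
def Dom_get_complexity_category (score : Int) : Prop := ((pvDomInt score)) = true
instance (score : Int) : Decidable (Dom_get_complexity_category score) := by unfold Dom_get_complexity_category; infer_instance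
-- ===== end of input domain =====

-- B replaces A's threshold-dict scan by an inlined conditional chain (idiomatic); both raise the same ValueError out of range (excluded by Pre_).

-- ===== PORT A =====
-- the module-level thresholds dict, in insertion order
def COMPLEXITY_SCORE_THRESHOLDS : List (String × (Int × Int)) :=
  [("low", (1, 30)), ("medium", (31, 60)), ("high", (61, 100))]

-- the for-loop over the dict items, first matching range wins, fallback "high"
def pvScanA (score : Int) : List (String × (Int × Int)) → String
  | [] => "high"
  | (category, (min_score, max_score)) :: rest =>
      if min_score ≤ score ∧ score ≤ max_score then category else pvScanA score rest

def get_complexity_category (score : Int) : String :=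
  pvScanA score COMPLEXITY_SCORE_THRESHOLDS

-- ===== PORT B =====
def get_complexity_category_alt (score : Int) : String :=
  if score ≤ 30 then "low"
  else if score ≤ 60 then "medium"
  else "high"

-- ===== PRECONDITION & SPEC =====
-- A raises ValueError outside 1..100; Pre_ excludes exactly those inputs.
def Pre_get_complexity_category (score : Int) : Prop := 1 ≤ score ∧ score ≤ 100
instance (score : Int) : Decidable (Pre_get_complexity_category score) := by unfold Pre_get_complexity_category; infer_instance
def pvWitness_get_complexity_category : Int := (42)

def Spec_get_complexity_category (score : Int) (out : String) : Prop := out = get_complexity_category_alt score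
instance (score : Int) (out : String) : Decidable (Spec_get_complexity_category score out) := by unfold Spec_get_complexity_category; infer_instance

-- ===== CLAIM (what is proved, stated in full; the proofs are below) =====
def Claim_equal_get_complexity_category : Prop := ∀ (score : Int), Dom_get_complexity_category score → Pre_get_complexity_category score → Spec_get_complexity_category score (get_complexity_category score)

-- ===== LEMMAS AND PROOFS =====

-- ===== VERDICT (by name: the statement is the Claim_ definition above) =====
theorem get_complexity_category_spec : Claim_equal_get_complexity_category := by
  intro score _ hpre
  obtain ⟨h1, h2⟩ := hpre
  unfold Spec_get_complexity_category get_complexity_category get_complexity_category_alt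
  simp only [COMPLEXITY_SCORE_THRESHOLDS, pvScanA]
  split_ifs <;> first | rfl | omega
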